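-- pv_equiv track=rewrite | github.com/metamedseg/Code | datasets/meta_dataset.py | get_volume_to_name_mapping
-- ===== SOURCE A (Python) =====
-- def get_volume_to_name_mapping(image_names):
--     vols = {}
--     image_id = 0
--     for name in image_names:
--         volume_id = name.split("_")[1]
--         if volume_id not in vols.keys():
--             vols[volume_id] = [image_id]
--         else:
--             vols[volume_id].append(image_id)
--         image_id += 1
--     return vols
-- ===== SOURCE B (Python) =====
-- def get_volume_to_name_mapping(image_names):
--     vids = [name.split("_")[1] for name in image_names]
--     keys = list(dict.fromkeys(vids))
--     return {k: [i for i, v in enumerate(vids) if v == k] for k in keys}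
-- ===== Notes on version B (the rewrite author's own statement) =====
-- stated objective: alternative
-- what changed: Replaces A's single incremental scan that builds the dict with membership-tested insert/append by a three-stage pipeline: extract all volume ids, dedup them in first-occurrence order (dict.fromkeys), then collect each key's indices with one enumerate comprehension per key.
import Mathlib
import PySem

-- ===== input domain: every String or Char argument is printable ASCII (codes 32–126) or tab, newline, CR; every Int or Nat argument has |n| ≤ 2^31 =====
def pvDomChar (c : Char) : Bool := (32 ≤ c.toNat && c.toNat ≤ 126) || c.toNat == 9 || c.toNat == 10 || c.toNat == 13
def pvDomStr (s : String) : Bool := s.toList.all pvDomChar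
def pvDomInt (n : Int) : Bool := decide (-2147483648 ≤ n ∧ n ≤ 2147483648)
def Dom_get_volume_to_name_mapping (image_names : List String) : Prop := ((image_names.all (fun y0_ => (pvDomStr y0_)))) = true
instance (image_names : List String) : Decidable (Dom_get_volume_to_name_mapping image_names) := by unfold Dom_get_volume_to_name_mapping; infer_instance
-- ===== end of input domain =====

-- B replaces A's incremental dict-building scan by a dedup-keys + per-key index-collection pass (alternative decomposition, same results).


-- ===== PORT A =====
-- name.split("_")[1]; the .getD defaults are never reached under Pre_ (index 1 exists exactly when "_" occurs in the name)
def pvVid (name : String) : String :=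
  (PySem.List.pyGet? ((PySem.Str.split? name "_").getD []) 1).getD ""

-- the for-loop of A: state = (vols, image_id)
def pvGoA : List String → PySem.Dict String (List Int) → Int → PySem.Dict String (List Int)
  | [], vols, _ => vols
  | name :: rest, vols, image_id =>
      let volume_id := pvVid name
      let vols' := if vols.contains volume_id = false
                   then vols.insert volume_id [image_id]
                   else vols.modify volume_id [] (fun l => l ++ [image_id])
      pvGoA rest vols' (image_id + 1)

def get_volume_to_name_mapping (image_names : List String) : List (String × List Int) :=
  (pvGoA image_names PySem.Dict.empty 0).items

-- ===== PORT B =====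
def get_volume_to_name_mapping_alt (image_names : List String) : List (String × List Int) :=
  let vids := image_names.map pvVid
  let keys := PySem.List.dedup vids
  keys.map (fun k =>
    (k, (PySem.List.enumerate vids 0).filterMap (fun p => if p.2 = k then some p.1 else none)))

-- ===== PRECONDITION & SPEC =====
-- Pre_ excludes exactly the names without an underscore, on which A's name.split("_")[1] raises IndexError (B raises there too).
def Pre_get_volume_to_name_mapping (image_names : List String) : Prop :=
  ∀ name ∈ image_names, PySem.Str.isIn "_" name = true
instance (image_names : List String) : Decidable (Pre_get_volume_to_name_mapping image_names) := by unfold Pre_get_volume_to_name_mapping; infer_instance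
def pvWitness_get_volume_to_name_mapping : List String := ["img_7_a", "img_9_b", "img_7_c"]

def Spec_get_volume_to_name_mapping (image_names : List String) (out : List (String × List Int)) : Prop := out = get_volume_to_name_mapping_alt image_names
instance (image_names : List String) (out : List (String × List Int)) : Decidable (Spec_get_volume_to_name_mapping image_names out) := by unfold Spec_get_volume_to_name_mapping; infer_instance

-- ===== CLAIM (what is proved, stated in full; the proofs are below) =====
def Claim_equal_get_volume_to_name_mapping : Prop := ∀ (image_names : List String), Dom_get_volume_to_name_mapping image_names → Pre_get_volume_to_name_mapping image_names → Spec_get_volume_to_name_mapping image_names (get_volume_to_name_mapping image_names)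

-- ===== LEMMAS AND PROOFS =====

-- A's two branches are one dict.modify
theorem pvStep_eq_modify (d : PySem.Dict String (List Int)) (v : String) (i : Int) :
    (if d.contains v = false then d.insert v [i] else d.modify v [] (fun l => l ++ [i]))
      = d.modify v [] (fun l => l ++ [i]) := by
  by_cases h : d.contains v = false
  · have hg : d.getD v [] = ([] : List Int) := by
      have h0 : d.get? v = none := by
        rw [PySem.Dict.get?_eq_none_iff_contains]; exact h
      simp [PySem.Dict.getD, h0]
    simp [h, PySem.Dict.modify, PySem.Dict.insert, hg]
  · simp [h]

-- A's loop is a fold of that modify over the (volume_id, image_id) pairs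
theorem pvGoA_eq_foldl (names : List String) (d : PySem.Dict String (List Int)) (i : Int) :
    pvGoA names d i
      = ((PySem.List.enumerate names i).map (fun p => (pvVid p.2, p.1))).foldl
          (fun d p => d.modify p.1 [] (fun l => l ++ [p.2])) d := by
  induction names generalizing d i with
  | nil => simp [pvGoA, PySem.List.enumerate_nil]
  | cons n rest ih =>
      simp only [pvGoA, PySem.List.enumerate_cons, List.map_cons, List.foldl_cons]
      rw [pvStep_eq_modify]
      exact ih _ _

theorem pvEnumerate_map {α β : Type} (f : α → β) (xs : List α) (s : Int) :
    PySem.List.enumerate (xs.map f) s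
      = (PySem.List.enumerate xs s).map (fun p => (p.1, f p.2)) := by
  induction xs generalizing s with
  | nil => simp [PySem.List.enumerate_nil]
  | cons x xs ih => simp [PySem.List.enumerate_cons, ih]

theorem pvFilter_map_eq_filterMap (l : List (Int × String)) (k : String) :
    ((l.map (fun p => (pvVid p.2, p.1))).filter (fun q => q.1 == k)).map (fun q => q.2)
      = (l.map (fun p => (p.1, pvVid p.2))).filterMap (fun p => if p.2 = k then some p.1 else none) := by
  induction l with
  | nil => rfl
  | cons p l ih =>
      by_cases h : pvVid p.2 = k <;> simp [h, ih]

-- ===== VERDICT (by name: the statement is the Claim_ definition above) =====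
theorem get_volume_to_name_mapping_spec : Claim_equal_get_volume_to_name_mapping := by
  intro image_names _ _
  show _ = _
  unfold get_volume_to_name_mapping get_volume_to_name_mapping_alt
  rw [pvGoA_eq_foldl]
  set pairs := (PySem.List.enumerate image_names 0).map (fun p => (pvVid p.2, p.1)) with hpairs
  have hnd : ((pairs.foldl (fun d p => d.modify p.1 [] (fun l => l ++ [p.2])) PySem.Dict.empty)).keys.Nodup := by
    apply PySem.Dict.nodup_keys_foldl_modify_key
    simp [PySem.Dict.empty, PySem.Dict.keys]
  rw [PySem.Dict.items_eq_map_keys _ hnd []]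
  have hkeys : (pairs.foldl (fun d p => d.modify p.1 [] (fun l => l ++ [p.2])) PySem.Dict.empty).keys
      = PySem.List.dedup (image_names.map pvVid) := by
    rw [PySem.Dict.keys_foldl_modify_key]
    have : pairs.map (fun p => p.1) = image_names.map pvVid := by
      rw [hpairs, List.map_map]
      have h2 := PySem.List.map_snd_enumerate image_names (0 : Int)
      simp only [Function.comp_def]
      rw [show (fun p : Int × String => pvVid p.2) = pvVid ∘ (fun p => p.2) from rfl,
        ← List.map_map, h2]
    rw [this]
    simp [PySem.Set.update, PySem.Set.ofList_eq_foldl, PySem.Dict.empty, PySem.Dict.keys]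
  rw [hkeys]
  apply List.map_congr_left
  intro k _
  rw [PySem.Dict.getD_foldl_modify_append]
  have hempty : (PySem.Dict.empty : PySem.Dict String (List Int)).getD k [] = [] := rfl
  rw [hempty, List.nil_append]
  rw [hpairs, pvFilter_map_eq_filterMap, pvEnumerate_map]
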